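-- pv_equiv track=rewrite | github.com/ElsevierSoftwareX/SOFTX_2020_238 | gstlal/python/datasource.py | framexmit_list_from_framexmit_dict
-- ===== SOURCE A (Python) =====
-- def framexmit_list_from_framexmit_dict(framexmit_dict, ifos = None, opt = "framexmit-addr"):
-- 	"""
-- 	Creates a string of framexmit address options from a dictionary keyed by ifos.
--
-- 	Examples:
--
-- 		>>> framexmit_list_from_framexmit_dict({'V1': ('224.3.2.3', 7098), 'H1': ('224.3.2.1', 7096), 'L1': ('224.3.2.2', 7097)})
-- 		'V1=224.3.2.3:7098 --framexmit-addr=H1=224.3.2.1:7096 --framexmit-addr=L1=224.3.2.2:7097 '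
-- 	"""
-- 	outstr = ""
-- 	if ifos is None:
-- 		ifos = framexmit_dict.keys()
-- 	for i, ifo in enumerate(ifos):
-- 		if i == 0:
-- 			outstr += "%s=%s:%s " % (ifo, framexmit_dict[ifo][0], framexmit_dict[ifo][1])
-- 		else:
-- 			outstr += "--%s=%s=%s:%s " % (opt, ifo, framexmit_dict[ifo][0], framexmit_dict[ifo][1])
--
-- 	return outstr
-- ===== SOURCE B (Python) =====
-- def framexmit_list_from_framexmit_dict(framexmit_dict, ifos = None, opt = "framexmit-addr"):
-- 	"""
-- 	Creates a string of framexmit address options from a dictionary keyed by ifos.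
-- 	"""
-- 	pieces = ["%s=%s:%s" % (ifo, framexmit_dict[ifo][0], framexmit_dict[ifo][1])
-- 	          for ifo in (framexmit_dict.keys() if ifos is None else ifos)]
-- 	return (" --%s=" % opt).join(pieces) + (" " if pieces else "")
-- ===== Notes on version B (the rewrite author's own statement) =====
-- stated objective: idiomatic
-- what changed: Replaces the enumerate loop with its i==0 first/rest branch by building the list of payload strings and placing the ' --opt=' prefix via str.join's separator, with one trailing space appended when the list is nonempty.
import Mathlib
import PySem

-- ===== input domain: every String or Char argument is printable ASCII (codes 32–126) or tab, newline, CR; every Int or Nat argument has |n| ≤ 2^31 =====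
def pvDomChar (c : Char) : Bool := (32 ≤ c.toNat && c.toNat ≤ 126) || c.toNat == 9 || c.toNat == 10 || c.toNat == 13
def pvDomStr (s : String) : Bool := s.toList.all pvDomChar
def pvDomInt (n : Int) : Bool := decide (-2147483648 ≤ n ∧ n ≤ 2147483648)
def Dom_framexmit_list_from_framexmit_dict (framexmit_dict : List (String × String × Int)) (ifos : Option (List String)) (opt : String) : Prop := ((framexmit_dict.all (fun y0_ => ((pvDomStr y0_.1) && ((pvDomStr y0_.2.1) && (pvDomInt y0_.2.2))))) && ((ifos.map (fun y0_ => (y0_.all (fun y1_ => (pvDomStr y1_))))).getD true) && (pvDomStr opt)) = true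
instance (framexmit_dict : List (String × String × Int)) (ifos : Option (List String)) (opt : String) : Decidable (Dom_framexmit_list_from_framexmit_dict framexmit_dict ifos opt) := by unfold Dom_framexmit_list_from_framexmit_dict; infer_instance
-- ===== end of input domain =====

-- ===== PORT A =====
-- B replaces the enumerate/i==0 loop by a map + join with the separator carrying the "--opt=" prefix (idiomatic decomposition).
def framexmit_list_from_framexmit_dict (framexmit_dict : List (String × String × Int)) (ifos : Option (List String)) (opt : String) : String :=
  let d := PySem.Dict.mk framexmit_dict
  let ifoList := match ifos with
    | none => PySem.Dict.keys d
    | some l => l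
  (PySem.List.enumerate ifoList).foldl (fun outstr p =>
    let v := PySem.Dict.getD d p.2 ("", 0)
    if p.1 == 0 then
      outstr ++ p.2 ++ "=" ++ v.1 ++ ":" ++ PySem.Int.toStr v.2 ++ " "
    else
      outstr ++ "--" ++ opt ++ "=" ++ p.2 ++ "=" ++ v.1 ++ ":" ++ PySem.Int.toStr v.2 ++ " ") ""

-- ===== PORT B =====
-- pvStrJoin sep parts = Python's sep.join(parts), exact: "" on [], no leading/trailing separator.
def pvStrJoin (sep : String) : List String → String
  | [] => ""
  | [x] => x
  | x :: y :: rest => x ++ sep ++ pvStrJoin sep (y :: rest)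

def framexmit_list_from_framexmit_dict_alt (framexmit_dict : List (String × String × Int)) (ifos : Option (List String)) (opt : String) : String :=
  let d := PySem.Dict.mk framexmit_dict
  let pieces := (match ifos with
    | none => PySem.Dict.keys d
    | some l => l).map (fun ifo =>
      let v := PySem.Dict.getD d ifo ("", 0)
      ifo ++ "=" ++ v.1 ++ ":" ++ PySem.Int.toStr v.2)
  pvStrJoin (" --" ++ opt ++ "=") pieces ++ (if pieces.isEmpty then "" else " ")

-- ===== PRECONDITION & SPEC =====
-- Pre_ excludes only inputs where A raises KeyError: an explicit ifos list containing a key absent from framexmit_dict.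
def Pre_framexmit_list_from_framexmit_dict (framexmit_dict : List (String × String × Int)) (ifos : Option (List String)) (opt : String) : Prop :=
  ∀ ifo ∈ ifos.getD (framexmit_dict.map (·.1)), ifo ∈ framexmit_dict.map (·.1)
instance (framexmit_dict : List (String × String × Int)) (ifos : Option (List String)) (opt : String) : Decidable (Pre_framexmit_list_from_framexmit_dict framexmit_dict ifos opt) := by unfold Pre_framexmit_list_from_framexmit_dict; infer_instance
def pvWitness_framexmit_list_from_framexmit_dict : (List (String × String × Int)) × Option (List String) × String :=
  ([("H1", "224.3.2.1", 7096), ("L1", "224.3.2.2", 7097)], some ["L1", "H1"], "framexmit-addr")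
def Spec_framexmit_list_from_framexmit_dict (framexmit_dict : List (String × String × Int)) (ifos : Option (List String)) (opt : String) (out : String) : Prop := out = framexmit_list_from_framexmit_dict_alt framexmit_dict ifos opt
instance (framexmit_dict : List (String × String × Int)) (ifos : Option (List String)) (opt : String) (out : String) : Decidable (Spec_framexmit_list_from_framexmit_dict framexmit_dict ifos opt out) := by unfold Spec_framexmit_list_from_framexmit_dict; infer_instance

-- ===== CLAIM (what is proved, stated in full; the proofs are below) =====
def Claim_equal_framexmit_list_from_framexmit_dict : Prop := ∀ (framexmit_dict : List (String × String × Int)) (ifos : Option (List String)) (opt : String), Dom_framexmit_list_from_framexmit_dict framexmit_dict ifos opt → Pre_framexmit_list_from_framexmit_dict framexmit_dict ifos opt → Spec_framexmit_list_from_framexmit_dict framexmit_dict ifos opt (framexmit_list_from_framexmit_dict framexmit_dict ifos opt)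

-- ===== LEMMAS AND PROOFS =====

def pvSeg (d : PySem.Dict String (String × Int)) (ifo : String) : String :=
  ifo ++ "=" ++ (d.getD ifo ("", 0)).1 ++ ":" ++ PySem.Int.toStr (d.getD ifo ("", 0)).2

def pvTail (d : PySem.Dict String (String × Int)) (opt : String) : List String → String
  | [] => ""
  | x :: xs => "--" ++ opt ++ "=" ++ pvSeg d x ++ " " ++ pvTail d opt xs

theorem pvA_tail (d : PySem.Dict String (String × Int)) (opt : String) :
    ∀ (xs : List String) (n : Int) (acc : String), 1 ≤ n →
    (PySem.List.enumerate xs n).foldl (fun outstr p =>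
      let v := d.getD p.2 ("", 0)
      if p.1 == 0 then
        outstr ++ p.2 ++ "=" ++ v.1 ++ ":" ++ PySem.Int.toStr v.2 ++ " "
      else
        outstr ++ "--" ++ opt ++ "=" ++ p.2 ++ "=" ++ v.1 ++ ":" ++ PySem.Int.toStr v.2 ++ " ") acc
      = acc ++ pvTail d opt xs
  | [], n, acc, _ => by simp [PySem.List.enumerate_nil, pvTail]
  | x :: xs, n, acc, h => by
    have hn : (n == 0) = false := by simp; omega
    rw [PySem.List.enumerate_cons]
    simp only [List.foldl_cons, hn, if_neg Bool.false_ne_true]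
    rw [pvA_tail d opt xs (n + 1) _ (by omega)]
    simp [pvTail, pvSeg, String.append_assoc]

theorem pvB_join (d : PySem.Dict String (String × Int)) (opt : String) :
    ∀ (x : String) (xs : List String),
    pvStrJoin (" --" ++ opt ++ "=") ((x :: xs).map (pvSeg d)) ++ " "
      = pvSeg d x ++ " " ++ pvTail d opt xs
  | x, [] => by
    apply String.toList_inj.mp
    simp [pvStrJoin, pvTail]
  | x, y :: ys => by
    rw [List.map_cons, List.map_cons, pvStrJoin]
    rw [String.append_assoc, String.append_assoc]
    have ih := pvB_join d opt y ys
    rw [List.map_cons] at ih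
    calc pvSeg d x ++ (" --" ++ opt ++ "=" ++ (pvStrJoin (" --" ++ opt ++ "=") (pvSeg d y :: List.map (pvSeg d) ys) ++ " "))
        = pvSeg d x ++ (" --" ++ opt ++ "=" ++ (pvSeg d y ++ " " ++ pvTail d opt ys)) := by rw [ih]
      _ = pvSeg d x ++ " " ++ pvTail d opt (y :: ys) := by
            apply String.toList_inj.mp
            simp [pvTail]

theorem pvMain (d : PySem.Dict String (String × Int)) (opt : String) :
    ∀ (l : List String),
    (PySem.List.enumerate l).foldl (fun outstr p =>
      let v := d.getD p.2 ("", 0)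
      if p.1 == 0 then
        outstr ++ p.2 ++ "=" ++ v.1 ++ ":" ++ PySem.Int.toStr v.2 ++ " "
      else
        outstr ++ "--" ++ opt ++ "=" ++ p.2 ++ "=" ++ v.1 ++ ":" ++ PySem.Int.toStr v.2 ++ " ") ""
      = pvStrJoin (" --" ++ opt ++ "=") (l.map (fun ifo =>
          let v := d.getD ifo ("", 0)
          ifo ++ "=" ++ v.1 ++ ":" ++ PySem.Int.toStr v.2))
        ++ (if (l.map (fun ifo =>
              let v := d.getD ifo ("", 0)
              ifo ++ "=" ++ v.1 ++ ":" ++ PySem.Int.toStr v.2)).isEmpty then "" else " ")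
  | [] => by
    apply String.toList_inj.mp
    simp [PySem.List.enumerate_nil, pvStrJoin]
  | x :: xs => by
    have hmap : ∀ (l : List String),
        l.map (fun ifo =>
          let v := d.getD ifo ("", 0)
          ifo ++ "=" ++ v.1 ++ ":" ++ PySem.Int.toStr v.2) = l.map (pvSeg d) := by
      intro l; simp [pvSeg]
    rw [hmap]
    rw [PySem.List.enumerate_cons, List.foldl_cons]
    simp only [show ((0 : Int) == 0) = true from rfl, if_true]
    rw [pvA_tail d opt xs (0 + 1) _ (by omega)]
    rw [show (List.map (pvSeg d) (x :: xs)).isEmpty = false from by simp, if_neg Bool.false_ne_true]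
    rw [pvB_join d opt x xs]
    simp [pvSeg, String.append_assoc]

-- ===== VERDICT (by name: the statement is the Claim_ definition above) =====
theorem framexmit_list_from_framexmit_dict_spec : Claim_equal_framexmit_list_from_framexmit_dict := by
  intro framexmit_dict ifos opt _ _
  unfold Spec_framexmit_list_from_framexmit_dict
  unfold framexmit_list_from_framexmit_dict framexmit_list_from_framexmit_dict_alt
  exact (pvMain (PySem.Dict.mk framexmit_dict) opt _).symm ▸ rfl
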